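-- pv_equiv track=rewrite | github.com/nkissick-del/unraid-mcp | tests/integration/test_schema_compliance.py | extract_root_field
-- ===== SOURCE A (Python) =====
-- def extract_root_field(query: str) -> tuple[str, str | None]:
--     """
--     Extracts the operation type and the root field from a GraphQL query string.
--     Returns (operation_type, root_field_name).
--     Very basic parser: looks for 'query', 'mutation', 'subscription' and the first block.
--     """
--     cleaned = " ".join(query.split())  # Remove newlines and extra spaces
--
--     op_type = "query"
--     if cleaned.strip().startswith("mutation"):
--         op_type = "mutation"
--     elif cleaned.strip().startswith("subscription"):
--         op_type = "subscription"
--     elif cleaned.strip().startswith("{"):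
--         # Shorthand query support
--         op_type = "query"
--
--     # Remove operation definition (e.g., "query MyQuery($var: Type) {")
--     # This is rough; a real parser is better but requires external deps.
--     # We assume standard formatting from our codebase: "query Name { rootField ... }"
--     # OR shorthand "{ rootField ... }"
--
--     # helper to find the first opening brace
--     start_idx = cleaned.find("{")
--     if start_idx == -1:
--         return op_type, None
--
--     content = cleaned[start_idx + 1 :].strip()
--
--     # The first word should be the root field
--     # Stop at space, (, {, or :
--     # e.g. "docker {" or "docker(arg: val)" or "alias: docker"
--
--     # Detect alias: "myAlias: fieldName"
--     # We scan for the first token. If it ends with ':' or is followed immediately by ':', it's an alias.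
--     i = 0
--     n = len(content)
--     while i < n:
--         # Skip leading whitespace
--         while i < n and content[i].isspace():
--             i += 1
--
--         # Start of token
--         start = i
--         while i < n and content[i] not in " ({:":
--             i += 1
--
--         token = content[start:i]
--
--         if not token:
--             return op_type, None
--
--         # Check delimiter
--         if i < n and content[i] == ":":
--             # It was an alias, skip the colon and continue to find real field
--             i += 1
--             continue
--
--         # Token found (not an alias)
--         return op_type, token
--
--     return op_type, None
-- ===== SOURCE B (Python) =====
-- def extract_root_field(query: str) -> tuple:
--     cleaned = " ".join(query.split())
--     if cleaned.startswith("mutation"):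
--         op_type = "mutation"
--     elif cleaned.startswith("subscription"):
--         op_type = "subscription"
--     else:
--         op_type = "query"
--     brace = cleaned.find("{")
--     if brace == -1:
--         return op_type, None
--     return op_type, _first_field(cleaned[brace + 1:].strip())
--
--
-- def _first_field(s: str):
--     """First non-alias token of s; recurses past 'alias:' prefixes."""
--     s = s.lstrip()
--     tok = ""
--     for idx, ch in enumerate(s):
--         if ch in " ({:":
--             if ch == ":" and tok:
--                 return _first_field(s[idx + 1:])
--             break
--         tok += ch
--     return tok or None
-- ===== Notes on version B (the rewrite author's own statement) =====
-- stated objective: simpler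
-- what changed: A's outer while loop with manual index arithmetic (skip-whitespace inner loop, token-scan inner loop, slicing by indices) is replaced by a recursive first-field helper that walks the content once, accumulating the token character by character and recursing on the suffix after an alias colon; the redundant .strip() before the startswith checks is dropped.
import Mathlib
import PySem

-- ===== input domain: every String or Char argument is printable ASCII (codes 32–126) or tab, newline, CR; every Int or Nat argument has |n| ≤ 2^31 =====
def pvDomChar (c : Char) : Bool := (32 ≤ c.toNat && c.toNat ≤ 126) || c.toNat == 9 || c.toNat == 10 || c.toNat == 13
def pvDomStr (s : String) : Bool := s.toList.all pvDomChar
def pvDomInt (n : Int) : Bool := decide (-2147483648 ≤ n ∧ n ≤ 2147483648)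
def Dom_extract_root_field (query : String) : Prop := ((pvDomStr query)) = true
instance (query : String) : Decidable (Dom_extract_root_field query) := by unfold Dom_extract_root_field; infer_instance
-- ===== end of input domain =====

-- B replaces A's index-arithmetic token scan by a recursive first-field helper that
-- accumulates the token and recurses on the suffix after an alias colon (objective: simpler).

-- ===== PORT A =====

-- `c in " ({:"` (membership of a single char in that 4-char string)
def pvIsDelim (c : Char) : Bool := [' ', '(', '{', ':'].contains c

-- inner `while i < n and content[i].isspace(): i += 1`
def pvSkipWs (s : List Char) (i : Nat) : Nat :=
  if h : i < s.length then
    if PySem.Chars.isspace s[i] then pvSkipWs s (i + 1) else i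
  else i
termination_by s.length - i

-- inner `while i < n and content[i] not in " ({:": i += 1`
def pvScanTok (s : List Char) (i : Nat) : Nat :=
  if h : i < s.length then
    if pvIsDelim s[i] then i else pvScanTok s (i + 1)
  else i
termination_by s.length - i

theorem le_pvSkipWs (s : List Char) (i : Nat) : i ≤ pvSkipWs s i := by
  fun_induction pvSkipWs s i <;> omega

theorem le_pvScanTok (s : List Char) (i : Nat) : i ≤ pvScanTok s i := by
  fun_induction pvScanTok s i <;> omega

-- A's outer `while i < n: …` over the content string
def pvALoop (s : List Char) (i : Nat) : Option (List Char) :=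
  if _h : i < s.length then
    let start := pvSkipWs s i
    let j := pvScanTok s start
    let token := PySem.List.slice s (some (start : Int)) (some (j : Int))
    if token = [] then none
    else if h2 : j < s.length then
      if s[j] = ':' then pvALoop s (j + 1) else some token
    else some token
  else none
termination_by s.length - i
decreasing_by
  have h1 := le_pvSkipWs s i
  have h2' := le_pvScanTok s (pvSkipWs s i)
  omega

def extract_root_field (query : String) : String × Option String :=
  let cleaned := PySem.Str.join " " (PySem.Str.split₀ query)
  let op_type : String :=
    if PySem.Str.startswith (PySem.Str.strip cleaned) "mutation" then "mutation"
    else if PySem.Str.startswith (PySem.Str.strip cleaned) "subscription" then "subscription"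
    else "query"   -- the `startswith "{"` elif re-assigns the existing default "query"
  let start_idx := PySem.Str.find cleaned "{"
  if start_idx = -1 then (op_type, none)
  else
    let content := PySem.Chars.strip (PySem.List.slice cleaned.toList (some (start_idx + 1)) none)
    match pvALoop content 0 with
    | none => (op_type, none)
    | some tok => (op_type, some (String.ofList tok))

-- ===== PORT B =====

-- `_first_field(s)` and its `for idx, ch in enumerate(s)` loop with accumulator `tok`
mutual
def pvBField (s : List Char) : Option (List Char) :=
  pvBLoop (PySem.Chars.lstrip s) []
termination_by (s.length, 1)
decreasing_by
  have := List.length_dropWhile_le (p := PySem.Chars.isspace) (l := s)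
  simp only [PySem.Chars.lstrip]
  omega
def pvBLoop : List Char → List Char → Option (List Char)
  | [], _tok => if _tok = [] then none else some _tok    -- loop ends without break
  | c :: rest, tok =>
    if pvIsDelim c then
      if c = ':' ∧ tok ≠ [] then pvBField rest
      else if tok = [] then none else some tok        -- `break` then `return tok or None`
    else pvBLoop rest (tok ++ [c])
termination_by u _ => (u.length, 0)
decreasing_by
  · simp only [List.length_cons]; omega
  · simp only [List.length_cons]; omega
end

def extract_root_field_alt (query : String) : String × Option String :=
  let cleaned := PySem.Str.join " " (PySem.Str.split₀ query)
  let op_type : String :=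
    if PySem.Str.startswith cleaned "mutation" then "mutation"
    else if PySem.Str.startswith cleaned "subscription" then "subscription"
    else "query"
  let brace := PySem.Str.find cleaned "{"
  if brace = -1 then (op_type, none)
  else
    match pvBField (PySem.Chars.strip (PySem.List.slice cleaned.toList (some (brace + 1)) none)) with
    | none => (op_type, none)
    | some tok => (op_type, some (String.ofList tok))

-- ===== PRECONDITION & SPEC =====
def Spec_extract_root_field (query : String) (out : String × Option String) : Prop := out = extract_root_field_alt query
instance (query : String) (out : String × Option String) : Decidable (Spec_extract_root_field query out) := by unfold Spec_extract_root_field; infer_instance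

-- ===== CLAIM (what is proved, stated in full; the proofs are below) =====
def Claim_equal_extract_root_field : Prop := ∀ (query : String), Dom_extract_root_field query → Spec_extract_root_field query (extract_root_field query)

-- ===== LEMMAS AND PROOFS =====

theorem pvSkipWs_eq (s : List Char) (i : Nat) :
    pvSkipWs s i = i + ((s.drop i).takeWhile PySem.Chars.isspace).length := by
  fun_induction pvSkipWs s i with
  | case1 i h hsp ih =>
    rw [List.drop_eq_getElem_cons h, List.takeWhile_cons]
    simp only [hsp, if_true, List.length_cons]
    omega
  | case2 i h hsp =>
    rw [List.drop_eq_getElem_cons h, List.takeWhile_cons]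
    simp [hsp]
  | case3 i h =>
    rw [List.drop_of_length_le (by omega)]
    simp

theorem pvScanTok_eq (s : List Char) (i : Nat) :
    pvScanTok s i = i + ((s.drop i).takeWhile (fun c => !pvIsDelim c)).length := by
  fun_induction pvScanTok s i with
  | case1 i h hd =>
    rw [List.drop_eq_getElem_cons h, List.takeWhile_cons]
    simp [hd]
  | case2 i h hd ih =>
    rw [List.drop_eq_getElem_cons h, List.takeWhile_cons]
    simp only [hd, Bool.not_false, if_true, List.length_cons]
    omega
  | case3 i h =>
    rw [List.drop_of_length_le (by omega)]
    simp
theorem drop_tw (l : List Char) (p : Char → Bool) : l.drop (l.takeWhile p).length = l.dropWhile p := by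
  have h := List.takeWhile_append_dropWhile (p:=p) (l:=l)
  calc l.drop (l.takeWhile p).length
      = (l.takeWhile p ++ l.dropWhile p).drop (l.takeWhile p).length := by rw [h]
    _ = l.dropWhile p := List.drop_left
theorem take_tw (l : List Char) (p : Char → Bool) : l.take (l.takeWhile p).length = l.takeWhile p := by
  have h := List.takeWhile_append_dropWhile (p:=p) (l:=l)
  calc l.take (l.takeWhile p).length
      = (l.takeWhile p ++ l.dropWhile p).take (l.takeWhile p).length := by rw [h]
    _ = l.takeWhile p := List.take_left
theorem pvBLoop_eq (u tok : List Char) :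
    pvBLoop u tok =
      (let t := tok ++ u.takeWhile (fun c => !pvIsDelim c)
       match u.dropWhile (fun c => !pvIsDelim c) with
       | [] => if t = [] then none else some t
       | c :: r => if c = ':' ∧ t ≠ [] then pvBField r
                   else if t = [] then none else some t) := by
  induction u generalizing tok with
  | nil => simp [pvBLoop]
  | cons c rest ih =>
    by_cases hd : pvIsDelim c
    · rw [pvBLoop]
      simp [hd]
    · rw [pvBLoop]
      simp only [hd, ih (tok ++ [c]), List.dropWhile_cons, List.takeWhile_cons,
        Bool.not_false, if_true]
      simp



theorem pvBField_drop (t : List Char) :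
    pvBField t =
      (match (t.dropWhile PySem.Chars.isspace).dropWhile (fun c => !pvIsDelim c) with
       | [] =>
         if (t.dropWhile PySem.Chars.isspace).takeWhile (fun c => !pvIsDelim c) = [] then none
         else some ((t.dropWhile PySem.Chars.isspace).takeWhile (fun c => !pvIsDelim c))
       | c :: r =>
         if c = ':' ∧ (t.dropWhile PySem.Chars.isspace).takeWhile (fun c => !pvIsDelim c) ≠ [] then
           pvBField r
         else if (t.dropWhile PySem.Chars.isspace).takeWhile (fun c => !pvIsDelim c) = [] then none
         else some ((t.dropWhile PySem.Chars.isspace).takeWhile (fun c => !pvIsDelim c))) := by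
  rw [pvBField, pvBLoop_eq]
  simp [PySem.Chars.lstrip]

theorem drop_pvSkipWs (s : List Char) (i : Nat) :
    s.drop (pvSkipWs s i) = (s.drop i).dropWhile PySem.Chars.isspace := by
  rw [pvSkipWs_eq, ← List.drop_drop, drop_tw]

theorem drop_pvScanTok (s : List Char) (i : Nat) :
    s.drop (pvScanTok s (pvSkipWs s i))
      = ((s.drop i).dropWhile PySem.Chars.isspace).dropWhile (fun c => !pvIsDelim c) := by
  rw [pvScanTok_eq, ← List.drop_drop, drop_pvSkipWs, drop_tw]

theorem token_eq (s : List Char) (i : Nat) :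
    PySem.List.slice s (some (pvSkipWs s i : Int)) (some (pvScanTok s (pvSkipWs s i) : Int))
      = ((s.drop i).dropWhile PySem.Chars.isspace).takeWhile (fun c => !pvIsDelim c) := by
  rw [PySem.List.slice_natCast, pvScanTok_eq, drop_pvSkipWs, Nat.add_sub_cancel_left, take_tw]

theorem pvALoop_eq_pvBField (s : List Char) (i : Nat) :
    pvALoop s i = pvBField (s.drop i) := by
  fun_induction pvALoop s i with
  | case1 i hi start j token htok =>
    have htok' : token = ((s.drop i).dropWhile PySem.Chars.isspace).takeWhile (fun c => !pvIsDelim c) :=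
      token_eq s i
    rw [htok'] at htok
    rw [pvBField_drop]
    split <;> simp only [htok, reduceIte, ne_eq, not_true_eq_false, and_false, if_false]
  | case2 i hi start j token htok hj hc ih =>
    have htok' : token = ((s.drop i).dropWhile PySem.Chars.isspace).takeWhile (fun c => !pvIsDelim c) :=
      token_eq s i
    have hdj : ((s.drop i).dropWhile PySem.Chars.isspace).dropWhile (fun c => !pvIsDelim c)
        = ':' :: s.drop (j + 1) := by
      rw [← drop_pvScanTok]
      show s.drop j = _
      rw [List.drop_eq_getElem_cons hj, hc]
    rw [htok'] at htok
    rw [pvBField_drop (s.drop i)]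
    simp only [hdj]
    rw [if_pos ⟨trivial, htok⟩]
    exact ih
  | case3 i hi start j token htok hj hc =>
    have htok' : token = ((s.drop i).dropWhile PySem.Chars.isspace).takeWhile (fun c => !pvIsDelim c) :=
      token_eq s i
    have hdj : ((s.drop i).dropWhile PySem.Chars.isspace).dropWhile (fun c => !pvIsDelim c)
        = s[j] :: s.drop (j + 1) := by
      rw [← drop_pvScanTok]
      show s.drop j = _
      rw [List.drop_eq_getElem_cons hj]
    rw [htok'] at htok
    rw [pvBField_drop]
    simp only [hdj]
    rw [if_neg (fun h => hc h.1), if_neg htok, htok']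
  | case4 i hi start j token htok hj =>
    have htok' : token = ((s.drop i).dropWhile PySem.Chars.isspace).takeWhile (fun c => !pvIsDelim c) :=
      token_eq s i
    have hdj : ((s.drop i).dropWhile PySem.Chars.isspace).dropWhile (fun c => !pvIsDelim c) = [] := by
      rw [← drop_pvScanTok]
      show s.drop j = []
      exact List.drop_of_length_le (by omega)
    rw [htok'] at htok
    rw [pvBField_drop]
    simp only [hdj]
    rw [if_neg htok, htok']
  | case5 i hi =>
    rw [List.drop_of_length_le (by omega)]
    simp [pvBField, pvBLoop, PySem.Chars.lstrip]

theorem split₀_go_good (l : List Char) :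
    ∀ (cur : List Char) (acc : List (List Char)),
      cur.all (fun c => !PySem.Chars.isspace c) = true →
      (∀ w ∈ acc, w ≠ [] ∧ w.all (fun c => !PySem.Chars.isspace c) = true) →
      ∀ w ∈ PySem.Chars.split₀.go l cur acc, w ≠ [] ∧ w.all (fun c => !PySem.Chars.isspace c) = true := by
  induction l with
  | nil =>
    intro cur acc hcur hacc w hw
    rw [PySem.Chars.split₀.go] at hw
    by_cases hc : cur.isEmpty
    · rw [if_pos hc] at hw
      exact hacc w (List.mem_reverse.mp hw)
    · rw [if_neg hc] at hw
      rcases List.mem_cons.mp (List.mem_reverse.mp hw) with h | h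
      · subst h
        constructor
        · simpa [List.isEmpty_iff] using hc
        · simpa using hcur
      · exact hacc w h
  | cons c rest ih =>
    intro cur acc hcur hacc w hw
    rw [PySem.Chars.split₀.go] at hw
    by_cases hs : PySem.Chars.isspace c
    · rw [if_pos hs] at hw
      by_cases hc : cur.isEmpty
      · rw [if_pos hc] at hw
        exact ih [] acc (by simp) hacc w hw
      · rw [if_neg hc] at hw
        refine ih [] (cur.reverse :: acc) (by simp) ?_ w hw
        intro v hv
        rcases hv with _ | hv
        · constructor
          · simpa [List.isEmpty_iff] using hc
          · simpa using hcur
        · exact hacc v (by assumption)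
    · rw [if_neg hs] at hw
      refine ih (c :: cur) acc ?_ hacc w hw
      simp [hcur, hs]

theorem split₀_good (l : List Char) :
    ∀ w ∈ PySem.Chars.split₀ l, w ≠ [] ∧ w.all (fun c => !PySem.Chars.isspace c) = true := by
  rw [PySem.Chars.split₀]
  exact split₀_go_good l [] [] (by simp) (by simp)

theorem intercalate_single (a : List Char) : List.intercalate [' '] [a] = a := by
  simp [List.intercalate]

theorem join_head_fix (words : List (List Char))
    (h : ∀ w ∈ words, w ≠ [] ∧ w.all (fun c => !PySem.Chars.isspace c) = true) :
    (List.intercalate [' '] words).dropWhile PySem.Chars.isspace = List.intercalate [' '] words := by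
  cases words with
  | nil => simp [List.intercalate]
  | cons w rest =>
    obtain ⟨hne, hall⟩ := h w (by simp)
    have hw0 : ∀ hl : 0 < w.length, ¬PySem.Chars.isspace w[0] = true := by
      intro hl
      simpa using List.all_eq_true.mp hall w[0] (List.getElem_mem hl)
    rw [List.dropWhile_eq_self_iff]
    intro hl
    cases rest with
    | nil =>
      simp only [intercalate_single] at hl ⊢
      exact hw0 hl
    | cons w2 r =>
      have hx : List.intercalate [' '] (w :: w2 :: r) = w ++ (' ' :: List.intercalate [' '] (w2 :: r)) := by
        simp [List.intercalate, List.intersperse]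
      simp only [hx] at *
      rw [List.getElem_append_left (by cases w with | nil => exact absurd rfl hne | cons a b => simp)]
      exact hw0 _

theorem join_rev_fix (words : List (List Char))
    (h : ∀ w ∈ words, w ≠ [] ∧ w.all (fun c => !PySem.Chars.isspace c) = true) :
    (List.intercalate [' '] words).reverse.dropWhile PySem.Chars.isspace
      = (List.intercalate [' '] words).reverse := by
  induction words with
  | nil => simp [List.intercalate]
  | cons w rest ih =>
    obtain ⟨hne, hall⟩ := h w (by simp)
    cases rest with
    | nil =>
      simp only [intercalate_single]
      rw [List.dropWhile_eq_self_iff]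
      intro hl
      have hmem : w.reverse[0] ∈ w := List.mem_reverse.mp (List.getElem_mem hl)
      simpa using List.all_eq_true.mp hall _ hmem
    | cons w2 r =>
      have ih' := ih (fun v hv => h v (List.mem_cons_of_mem _ hv))
      have hJne : List.intercalate [' '] (w2 :: r) ≠ [] := by
        obtain ⟨hne2, _⟩ := h w2 (by simp)
        cases r with
        | nil => rw [intercalate_single]; exact hne2
        | cons w3 r' =>
          have : List.intercalate [' '] (w2 :: w3 :: r') = w2 ++ (' ' :: List.intercalate [' '] (w3 :: r')) := by
            simp [List.intercalate, List.intersperse]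
          rw [this]
          simp [hne2]
      have hx : List.intercalate [' '] (w :: w2 :: r) = w ++ (' ' :: List.intercalate [' '] (w2 :: r)) := by
        simp [List.intercalate, List.intersperse]
      rw [hx]
      cases hrev : (List.intercalate [' '] (w2 :: r)).reverse with
      | nil => exact absurd (by simpa using hrev) hJne
      | cons d t =>
        have hd : ¬PySem.Chars.isspace d = true := by
          rw [hrev] at ih'
          intro hds
          have := congrArg List.length (by simpa [List.dropWhile_cons, hds] using ih')
          have hle := List.length_dropWhile_le (p := PySem.Chars.isspace) (l := t)
          simp at this
          omega
        rw [List.reverse_append, List.reverse_cons, hrev]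
        simp only [List.append_assoc, List.cons_append]
        rw [List.dropWhile_cons_of_neg hd]

theorem strip_cleaned (l : List Char) :
    PySem.Chars.strip (PySem.Chars.join [' '] (PySem.Chars.split₀ l))
      = PySem.Chars.join [' '] (PySem.Chars.split₀ l) := by
  have hg := split₀_good l
  simp only [PySem.Chars.strip, PySem.Chars.lstrip, PySem.Chars.rstrip, PySem.Chars.join]
  rw [join_head_fix _ hg, join_rev_fix _ hg, List.reverse_reverse]

-- ===== VERDICT (by name: the statement is the Claim_ definition above) =====

theorem extract_root_field_spec : Claim_equal_extract_root_field := by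
  intro query _hdom
  unfold Spec_extract_root_field extract_root_field extract_root_field_alt
  have hclean : (PySem.Str.join " " (PySem.Str.split₀ query)).toList
      = PySem.Chars.join [' '] (PySem.Chars.split₀ query.toList) := by
    rw [PySem.Str.toList_join, PySem.Str.split₀_map_toList]
    rfl
  have hsw : ∀ p : String,
      PySem.Str.startswith (PySem.Str.strip (PySem.Str.join " " (PySem.Str.split₀ query))) p
        = PySem.Str.startswith (PySem.Str.join " " (PySem.Str.split₀ query)) p := by
    intro p
    rw [PySem.Str.startswith_eq, PySem.Str.startswith_eq, PySem.Str.toList_strip, hclean,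
      strip_cleaned, ← hclean]
  simp only [hsw]
  rw [pvALoop_eq_pvBField, List.drop_zero]
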